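-- pv_equiv track=rewrite | github.com/malikovmik/software | lab_5/pythonProject1/lab_5_5.py | transform_to_set
-- ===== SOURCE A (Python) =====
-- def transform_to_set(list):
--     count = {}
--     for elem in list:
--         count[elem] = list.count(elem)
--     result_set = set()
--     for elem, value in count.items():
--         result_set.add(elem)
--         for i in range(2, value + 1):
--             result_set.add(str(elem) * i)
--     return result_set
-- ===== SOURCE B (Python) =====
-- def transform_to_set(list):
--     result = set()
--     rest = list
--     while rest:
--         x = rest[0]
--         smaller = [e for e in rest if e != x]
--         for i in range(1, len(rest) - len(smaller) + 1):
--             result.add(x * i)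
--         rest = smaller
--     return result
-- ===== Notes on version B (the rewrite author's own statement) =====
-- stated objective: faster
-- what changed: Replaces A's dict of per-element list.count totals (a full O(n) count scan per element) followed by a second emission loop with a dict-free partition loop: repeatedly take the head element, filter all its copies out of the remaining list, read its multiplicity off the length drop, emit x*i for i in 1..c, and continue on the filtered remainder.
import Mathlib
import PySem

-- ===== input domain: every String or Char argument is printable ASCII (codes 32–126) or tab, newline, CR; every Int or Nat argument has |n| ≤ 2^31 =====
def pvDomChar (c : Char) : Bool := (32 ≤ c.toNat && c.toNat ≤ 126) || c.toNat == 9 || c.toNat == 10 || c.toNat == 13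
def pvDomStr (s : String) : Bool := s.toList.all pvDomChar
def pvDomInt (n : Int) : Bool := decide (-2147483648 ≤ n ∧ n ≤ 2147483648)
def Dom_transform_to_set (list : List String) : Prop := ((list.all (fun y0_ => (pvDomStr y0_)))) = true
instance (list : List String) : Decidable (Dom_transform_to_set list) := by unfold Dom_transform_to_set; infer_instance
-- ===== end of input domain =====

-- B replaces A's count-dict plus second emission loop by a dict-free partition loop: take the head,
-- filter its copies out of the remainder, read the multiplicity off the length drop (objective: faster; measured).

-- ===== PORT A =====
def transform_to_set (list : List String) : List String :=
  let count : PySem.Dict String Int :=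
    list.foldl (fun d elem => d.insert elem (PySem.List.count list elem : Int)) PySem.Dict.empty
  count.items.foldl (fun s p =>
    let s := PySem.Set.add s p.1
    (PySem.List.pyRange 2 (p.2 + 1) 1).foldl
      (fun s i => PySem.Set.add s (String.ofList (PySem.List.pyRepeat p.1.toList i))) s)
    PySem.Set.empty

-- ===== PORT B =====
-- the while loop of Source B: state (result, rest); stops when rest is empty
def transform_to_set_altGo (result : List String) (rest : List String) : List String :=
  match rest with
  | [] => result
  | x :: t =>
    let smaller := (x :: t).filter (fun e => !(e == x))
    let result := (PySem.List.pyRange 1 ((((x :: t).length : Int) - (smaller.length : Int)) + 1) 1).foldl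
        (fun s i => PySem.Set.add s (String.ofList (PySem.List.pyRepeat x.toList i))) result
    transform_to_set_altGo result smaller
termination_by rest.length
decreasing_by
  simp only [List.filter_cons, beq_self_eq_true, Bool.not_true, List.length_cons]
  exact Nat.lt_succ_of_le (List.length_filter_le _ _)

def transform_to_set_alt (list : List String) : List String :=
  transform_to_set_altGo PySem.Set.empty list

-- ===== PRECONDITION & SPEC =====
def Spec_transform_to_set (list : List String) (out : List String) : Prop := out = transform_to_set_alt list
instance (list : List String) (out : List String) : Decidable (Spec_transform_to_set list out) := by unfold Spec_transform_to_set; infer_instance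

-- ===== CLAIM =====
def Claim_equal_transform_to_set : Prop := ∀ (list : List String), Dom_transform_to_set list → Spec_transform_to_set list (transform_to_set list)

-- ===== LEMMAS AND PROOFS =====

-- A's dict maps each key to a constant (per-key) value: getD after the loop
theorem getD_foldl_insert_const {κ : Type} [BEq κ] [LawfulBEq κ] [DecidableEq κ]
    (l : List κ) (f : κ → Int) (d : PySem.Dict κ Int) (k : κ) (d0 : Int) :
    (l.foldl (fun d e => d.insert e (f e)) d).getD k d0 =
      if k ∈ l then f k else d.getD k d0 := by
  induction l generalizing d with
  | nil => simp
  | cons x t ih =>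
    simp only [List.foldl_cons, ih, List.mem_cons]
    by_cases hx : k = x
    · subst hx
      by_cases ht : k ∈ t <;> simp [ht, PySem.Dict.getD_insert_self]
    · by_cases ht : k ∈ t <;> simp [hx, ht, PySem.Dict.getD_insert]

-- A's dict has exactly Counter(list)'s items
theorem items_A_eq (list : List String) :
    (list.foldl (fun d elem => d.insert elem (PySem.List.count list elem : Int))
        (PySem.Dict.empty : PySem.Dict String Int)).items =
      (PySem.Set.ofList list).map (fun k => (k, (list.count k : Int))) := by
  have hk : (list.foldl (fun d elem => d.insert elem (PySem.List.count list elem : Int))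
        (PySem.Dict.empty : PySem.Dict String Int)).keys = PySem.Set.ofList list := by
    rw [PySem.Dict.keys_foldl_insert]
    simp [PySem.Set.update_nil_left]
  have hnd : (list.foldl (fun d elem => d.insert elem (PySem.List.count list elem : Int))
        (PySem.Dict.empty : PySem.Dict String Int)).keys.Nodup :=
    PySem.Dict.nodup_keys_foldl_insert _ _ _ (by simp)
  rw [PySem.Dict.items_eq_map_keys _ hnd 0, hk]
  refine List.map_congr_left (fun k hkmem => ?_)
  have hmem : k ∈ list := (PySem.Set.mem_ofList _ _).mp hkmem
  rw [getD_foldl_insert_const]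
  simp [hmem, PySem.List.count_eq]

theorem pyRepeat_one (xs : List Char) : PySem.List.pyRepeat xs 1 = xs := by
  simp [PySem.List.pyRepeat]

-- the per-item emission steps agree when the count is positive
theorem step_eq (s : List String) (p : String × Int) (hc : 1 ≤ p.2) :
    (PySem.List.pyRange 1 (p.2 + 1) 1).foldl
        (fun s i => PySem.Set.add s (String.ofList (PySem.List.pyRepeat p.1.toList i))) s =
      (PySem.List.pyRange 2 (p.2 + 1) 1).foldl
        (fun s i => PySem.Set.add s (String.ofList (PySem.List.pyRepeat p.1.toList i)))
        (PySem.Set.add s p.1) := by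
  rw [PySem.List.pyRange_one_cons (by omega : (1 : Int) < p.2 + 1)]
  simp [pyRepeat_one, String.ofList_toList]

-- adding elements none of which is x, starting from x :: s, keeps x in front
theorem foldl_add_cons (l : List String) (x : String) (s : List String) (hx : x ∉ l) :
    l.foldl PySem.Set.add (x :: s) = x :: l.foldl PySem.Set.add s := by
  induction l generalizing s with
  | nil => rfl
  | cons y t ih =>
    have hyx : ¬ (y == x) = true := by
      simp only [beq_iff_eq]; exact fun h => hx (h ▸ List.mem_cons_self)
    have hne : y ≠ x := by simpa using hyx
    have hadd : PySem.Set.add (x :: s) y = x :: PySem.Set.add s y := by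
      simp [PySem.Set.add, PySem.Set.contains, hne]
      split_ifs <;> simp
    rw [List.foldl_cons, hadd, ih _ (fun h => hx (List.mem_cons_of_mem _ h)), List.foldl_cons]

-- filtering out an element already in the accumulator does not change the fold
theorem foldl_add_filter (l : List String) (x : String) (s : List String) (hx : x ∈ s) :
    l.foldl PySem.Set.add s = (l.filter (fun e => !(e == x))).foldl PySem.Set.add s := by
  induction l generalizing s with
  | nil => rfl
  | cons y t ih =>
    by_cases hyx : y = x
    · subst hyx
      have : PySem.Set.add s y = s := by
        simp [PySem.Set.add, PySem.Set.contains, hx]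
      simp only [List.filter_cons, beq_self_eq_true, Bool.not_true, List.foldl_cons, this]
      exact ih s hx
    · have : (!(y == x)) = true := by simp [hyx]
      simp only [List.filter_cons, this, if_true, List.foldl_cons]
      exact ih _ (by
        simp only [PySem.Set.add]
        split_ifs <;> simp [hx])

-- set(x :: t) = x followed by set of t with all copies of x removed
theorem ofList_cons_filter (x : String) (t : List String) :
    PySem.Set.ofList (x :: t) = x :: PySem.Set.ofList (t.filter (fun e => !(e == x))) := by
  have h1 : PySem.Set.ofList (x :: t) = t.foldl PySem.Set.add [x] := by
    rw [PySem.Set.ofList_eq_foldl]; rfl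
  rw [h1, foldl_add_filter t x [x] (by simp)]
  rw [foldl_add_cons _ x [] (by simp), PySem.Set.ofList_eq_foldl]

-- emission step of both programs, as a named function
def emitStep (s : List String) (p : String × Int) : List String :=
  (PySem.List.pyRange 1 (p.2 + 1) 1).foldl
    (fun s i => PySem.Set.add s (String.ofList (PySem.List.pyRepeat p.1.toList i))) s

-- main invariant: folding the emission step over (key, count) pairs of the dedup equals B's partition loop
theorem foldl_emit_eq_altGo (l : List String) (s : List String) :
    ((PySem.Set.ofList l).map (fun k => (k, (l.count k : Int)))).foldl emitStep s =
      transform_to_set_altGo s l := by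
  induction s, l using transform_to_set_altGo.induct with
  | case1 => simp [transform_to_set_altGo]
  | case2 s x t smaller result ih =>
    have hsm : smaller = t.filter (fun e => !(e == x)) := by
      simp [smaller]
    conv_rhs => rw [transform_to_set_altGo]
    rw [ofList_cons_filter, List.map_cons, List.foldl_cons]
    have hmapc : ∀ k ∈ PySem.Set.ofList (t.filter (fun e => !(e == x))),
        (k, (((x :: t).count k : Int))) = (k, (((t.filter (fun e => !(e == x))).count k : Int))) := by
      intro k hk
      have hk' : k ∈ t.filter (fun e => !(e == x)) := (PySem.Set.mem_ofList _ _).mp hk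
      have hne : k ≠ x := by
        have := List.of_mem_filter hk'; simpa using this
      have : (x :: t).count k = (t.filter (fun e => !(e == x))).count k := by
        rw [List.count_filter (by simp [hne])]
        simp only [List.count_cons]
        have hxk : ¬ x = k := fun h => hne h.symm
        simp [hxk]
      rw [this]
    rw [List.map_congr_left hmapc]
    have hlen : (t.filter (fun e => !(e == x))).length + t.count x = t.length := by
      have h1 : t.countP (fun e => !(e == x)) = (t.filter (fun e => !(e == x))).length :=
        List.countP_eq_length_filter
      have h2 := List.length_eq_countP_add_countP (p := fun e => !(e == x)) (l := t)
      have h3 : t.countP (fun e => ¬(!(e == x)) = true) = t.count x := by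
        simp only [Bool.not_eq_true', Bool.not_eq_false, List.count]
        apply List.countP_congr
        intro a _; simp
      omega
    have hc : (((x :: t).count x : Int)) = ((x :: t).length : Int) - (smaller.length : Int) := by
      simp only [hsm, List.count_cons_self, List.length_cons]
      push_cast
      omega
    have hres : emitStep s (x, ((x :: t).count x : Int)) = result := by
      simp only [emitStep, hc]
      rfl
    rw [hres, ← hsm]
    exact ih

-- ===== VERDICT =====
theorem transform_to_set_spec : Claim_equal_transform_to_set := by
  intro list _
  simp only [Spec_transform_to_set, transform_to_set, transform_to_set_alt]
  rw [items_A_eq]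
  rw [← foldl_emit_eq_altGo]
  refine PySem.List.foldl_congr_mem _ _ _ _ ?_
  intro s p hp
  rcases List.mem_map.mp hp with ⟨k, hk, rfl⟩
  have hmem : k ∈ list := (PySem.Set.mem_ofList _ _).mp hk
  have hc : (1 : Int) ≤ (list.count k : Int) := by
    exact_mod_cast List.count_pos_iff.mpr hmem
  exact (step_eq s _ hc).symm
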